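-- pv_equiv track=rewrite | github.com/qtgeo1248/AdventOfCode | 2021/Day23/a.py | possNextRoom
-- ===== SOURCE A (Python) =====
-- def getDest(typeFrog):
--     return 2 * (ord(typeFrog) - ord('A')) + 3
--
-- def possNextRoom(board, hallx, y, takenCoords, typeFrog):
--     poss = []
--     goRight = True
--     goLeft = True
--     for d in range(1, len(board[hallx])):
--         if (hallx, y + d) in takenCoords:
--             goRight = False
--         if (hallx, y - d) in takenCoords:
--             goLeft = False
--         if goRight and y + d == getDest(typeFrog):
--             poss.append(y + d)
--         if goLeft and y - d == getDest(typeFrog):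
--             poss.append(y - d)
--     newPoss = []
--     for newY in poss:
--         if (hallx + 1, newY) not in takenCoords:
--             if (hallx + 2, newY) not in takenCoords:
--                 newPoss.append((hallx + 2, newY))
--             else:
--                 newPoss.append((hallx + 1, newY))
--     return newPoss
-- ===== SOURCE B (Python) =====
-- def getDest(typeFrog):
--     return 2 * (ord(typeFrog) - ord('A')) + 3
--
-- def possNextRoom(board, hallx, y, takenCoords, typeFrog):
--     n = len(board[hallx])
--     if n < 2:
--         return []
--     dest = getDest(typeFrog)
--     if dest == y or abs(dest - y) > n - 1:
--         return []
--     step = 1 if y < dest else -1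
--     for c in range(y + step, dest + step, step):
--         if (hallx, c) in takenCoords:
--             return []
--     if (hallx + 1, dest) in takenCoords:
--         return []
--     if (hallx + 2, dest) in takenCoords:
--         return [(hallx + 1, dest)]
--     return [(hallx + 2, dest)]
-- ===== Notes on version B (the rewrite author's own statement) =====
-- stated objective: simpler
-- what changed: Instead of scanning every distance 1..len(board[hallx])-1 in both directions while maintaining goRight/goLeft flags, B computes dest = getDest(typeFrog) directly, rejects if dest == y or |dest-y| exceeds the row, walks only the cells between y and dest (inclusive) for blockers, and then applies the same two-level room-depth check.
-- outside the precondition, e.g. on possNextRoom([[0, 0, 0]], 0, 5, {(0, 4), (0, 6)}, ''): A returns [], B raises TypeError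
import Mathlib
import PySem

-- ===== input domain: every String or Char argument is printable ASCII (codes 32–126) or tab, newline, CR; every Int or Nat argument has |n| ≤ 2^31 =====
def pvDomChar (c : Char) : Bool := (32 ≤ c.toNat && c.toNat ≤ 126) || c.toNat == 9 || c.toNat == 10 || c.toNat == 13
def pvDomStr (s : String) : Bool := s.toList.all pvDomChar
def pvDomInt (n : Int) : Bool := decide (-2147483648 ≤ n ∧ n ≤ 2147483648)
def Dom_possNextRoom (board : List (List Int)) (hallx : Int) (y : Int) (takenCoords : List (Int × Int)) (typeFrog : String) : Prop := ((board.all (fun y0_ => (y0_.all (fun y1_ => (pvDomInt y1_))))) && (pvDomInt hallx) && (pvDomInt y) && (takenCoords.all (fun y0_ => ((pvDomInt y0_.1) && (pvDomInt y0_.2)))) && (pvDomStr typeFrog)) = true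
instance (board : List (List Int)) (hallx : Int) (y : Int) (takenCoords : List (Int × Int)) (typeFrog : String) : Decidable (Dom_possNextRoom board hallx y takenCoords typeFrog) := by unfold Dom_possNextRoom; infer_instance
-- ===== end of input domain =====

-- B computes the single destination cell directly and walks only the path to it, instead of
-- A's full-row scan in both directions with goRight/goLeft flags (objective: simpler).

-- ===== PORT A =====
-- ord(typeFrog) for a one-character string (exact whenever Pre_ lets it be evaluated: Pre_
-- guarantees typeFrog has length 1 whenever the loop body that calls getDest runs)
def pvGetDest (typeFrog : String) : Int :=
  2 * (((typeFrog.toList.headD 'A').toNat : Int) - 65) + 3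

def possNextRoom (board : List (List Int)) (hallx : Int) (y : Int) (takenCoords : List (Int × Int)) (typeFrog : String) : List (Int × Int) :=
  let row : List Int := (PySem.List.pyGet? board hallx).getD []
  let st :=
    (PySem.List.pyRange 1 (row.length : Int) 1).foldl
      (fun (s : List Int × Bool × Bool) d =>
        let goRight := if takenCoords.contains (hallx, y + d) then false else s.2.1
        let goLeft := if takenCoords.contains (hallx, y - d) then false else s.2.2
        let poss1 := if goRight && decide (y + d = pvGetDest typeFrog) then s.1 ++ [y + d] else s.1
        let poss2 := if goLeft && decide (y - d = pvGetDest typeFrog) then poss1 ++ [y - d] else poss1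
        (poss2, goRight, goLeft))
      ([], true, true)
  st.1.foldl
    (fun acc newY =>
      if !takenCoords.contains (hallx + 1, newY) then
        if !takenCoords.contains (hallx + 2, newY) then acc ++ [(hallx + 2, newY)]
        else acc ++ [(hallx + 1, newY)]
      else acc)
    []

-- ===== PORT B =====
def possNextRoom_alt (board : List (List Int)) (hallx : Int) (y : Int) (takenCoords : List (Int × Int)) (typeFrog : String) : List (Int × Int) :=
  let n : Int := (((PySem.List.pyGet? board hallx).getD []).length : Int)
  if n < 2 then []
  else
    let dest := pvGetDest typeFrog
    if dest = y ∨ n - 1 < |dest - y| then []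
    else
      let step : Int := if y < dest then 1 else -1
      if (PySem.List.pyRange (y + step) (dest + step) step).any
          (fun c => takenCoords.contains (hallx, c)) then []
      else if takenCoords.contains (hallx + 1, dest) then []
      else if takenCoords.contains (hallx + 2, dest) then [(hallx + 1, dest)]
      else [(hallx + 2, dest)]

-- ===== PRECONDITION & SPEC =====
-- Pre_ excludes inputs where board[hallx] is out of range (A raises IndexError) and inputs where
-- typeFrog is not a single character while the hallway row has length ≥ 2 (A's ord(typeFrog)
-- raises TypeError there unless short-circuit evaluation accidentally avoids the call; B raises).
def Pre_possNextRoom (board : List (List Int)) (hallx : Int) (y : Int) (takenCoords : List (Int × Int)) (typeFrog : String) : Prop :=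
  (PySem.List.pyGet? board hallx).isSome = true ∧
  (typeFrog.length = 1 ∨ ((PySem.List.pyGet? board hallx).getD []).length < 2)

instance (board : List (List Int)) (hallx : Int) (y : Int) (takenCoords : List (Int × Int)) (typeFrog : String) : Decidable (Pre_possNextRoom board hallx y takenCoords typeFrog) := by
  unfold Pre_possNextRoom; infer_instance

def pvWitness_possNextRoom : List (List Int) × Int × Int × (List (Int × Int)) × String :=
  ([[0, 0, 0, 0, 0, 0, 0, 0, 0, 0, 0]], 0, 0, [], "A")

def Spec_possNextRoom (board : List (List Int)) (hallx : Int) (y : Int) (takenCoords : List (Int × Int)) (typeFrog : String) (out : List (Int × Int)) : Prop := out = possNextRoom_alt board hallx y takenCoords typeFrog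
instance (board : List (List Int)) (hallx : Int) (y : Int) (takenCoords : List (Int × Int)) (typeFrog : String) (out : List (Int × Int)) : Decidable (Spec_possNextRoom board hallx y takenCoords typeFrog out) := by unfold Spec_possNextRoom; infer_instance

-- ===== CLAIM (what is proved, stated in full; the proofs are below) =====
def Claim_equal_possNextRoom : Prop := ∀ (board : List (List Int)) (hallx : Int) (y : Int) (takenCoords : List (Int × Int)) (typeFrog : String), Dom_possNextRoom board hallx y takenCoords typeFrog → Pre_possNextRoom board hallx y takenCoords typeFrog → Spec_possNextRoom board hallx y takenCoords typeFrog (possNextRoom board hallx y takenCoords typeFrog)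

-- ===== LEMMAS AND PROOFS =====

-- pvClearR h y t m = true ↔ no taken cell at y+1 .. y+m (right-going path of length m clear)
def pvClearR (hallx y : Int) (taken : List (Int × Int)) : Nat → Bool
  | 0 => true
  | m + 1 => pvClearR hallx y taken m && !taken.contains (hallx, y + ((m : Int) + 1))

def pvClearL (hallx y : Int) (taken : List (Int × Int)) : Nat → Bool
  | 0 => true
  | m + 1 => pvClearL hallx y taken m && !taken.contains (hallx, y - ((m : Int) + 1))

-- the value of A's `poss` after the first m loop iterations
def pvPoss (hallx y dest : Int) (taken : List (Int × Int)) (m : Nat) : List Int :=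
  if 0 < dest - y ∧ dest - y ≤ (m : Int) ∧ pvClearR hallx y taken (dest - y).toNat = true then [dest]
  else if dest - y < 0 ∧ y - dest ≤ (m : Int) ∧ pvClearL hallx y taken (y - dest).toNat = true then [dest]
  else []

theorem loopA_inv (hallx y dest : Int) (taken : List (Int × Int)) (m : Nat) :
    (PySem.List.pyRange 1 ((m : Int) + 1) 1).foldl
      (fun (s : List Int × Bool × Bool) d =>
        let goRight := if taken.contains (hallx, y + d) then false else s.2.1
        let goLeft := if taken.contains (hallx, y - d) then false else s.2.2
        let poss1 := if goRight && decide (y + d = dest) then s.1 ++ [y + d] else s.1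
        let poss2 := if goLeft && decide (y - d = dest) then poss1 ++ [y - d] else poss1
        (poss2, goRight, goLeft))
      ([], true, true)
    = (pvPoss hallx y dest taken m, pvClearR hallx y taken m, pvClearL hallx y taken m) := by
  induction m with
  | zero =>
      rw [PySem.List.pyRange_one_eq_nil (by omega)]
      simp only [pvPoss, pvClearR, pvClearL, List.foldl]
      rw [if_neg (by rintro ⟨h1, h2, _⟩; omega), if_neg (by rintro ⟨h1, h2, _⟩; omega)]
  | succ m ih =>
      have h1 : ((m + 1 : Nat) : Int) + 1 = ((m : Int) + 1) + 1 := by push_cast; ring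
      rw [h1, PySem.List.pyRange_one_succ_right (by omega), List.foldl_append, ih]
      simp only [List.foldl]
      have hgR : (if taken.contains (hallx, y + ((m : Int) + 1)) = true then false
            else pvClearR hallx y taken m) = pvClearR hallx y taken (m + 1) := by
        cases hc : taken.contains (hallx, y + ((m : Int) + 1)) <;>
          simp only [pvClearR, hc, Bool.not_false, Bool.not_true, Bool.and_true, Bool.and_false,
            Bool.false_eq_true, if_false, if_true]
      have hgL : (if taken.contains (hallx, y - ((m : Int) + 1)) = true then false
            else pvClearL hallx y taken m) = pvClearL hallx y taken (m + 1) := by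
        cases hc : taken.contains (hallx, y - ((m : Int) + 1)) <;>
          simp only [pvClearL, hc, Bool.not_false, Bool.not_true, Bool.and_true, Bool.and_false,
            Bool.false_eq_true, if_false, if_true]
      rw [hgR, hgL]
      simp only [Prod.mk.injEq]
      refine ⟨?_, trivial⟩
      by_cases hR : y + ((m : Int) + 1) = dest
      · have hRd : decide (y + ((m : Int) + 1) = dest) = true := by simp [hR]
        have hLd : decide (y - ((m : Int) + 1) = dest) = false := by simp; omega
        have hpm : pvPoss hallx y dest taken m = [] := by
          unfold pvPoss
          rw [if_neg (by rintro ⟨_, h2, _⟩; omega), if_neg (by rintro ⟨h1, _, _⟩; omega)]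
        have hkR : (dest - y).toNat = m + 1 := by omega
        have hp1 : pvPoss hallx y dest taken (m + 1) =
            (if pvClearR hallx y taken (m + 1) = true then [dest] else []) := by
          unfold pvPoss
          rw [hkR]
          by_cases hc : pvClearR hallx y taken (m + 1) = true
          · rw [if_pos ⟨by omega, by push_cast; omega, hc⟩, if_pos hc]
          · rw [if_neg (by rintro ⟨_, _, h3⟩; exact hc h3), if_neg hc,
              if_neg (by rintro ⟨h1, _, _⟩; omega)]
        rw [hRd, hLd, hp1, hpm]
        simp only [Bool.and_false, Bool.and_true, Bool.false_eq_true, if_false]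
        by_cases hc : pvClearR hallx y taken (m + 1) = true
        · rw [if_pos hc, if_pos hc]; simp [hR]
        · rw [if_neg hc, if_neg hc]
      · by_cases hL : y - ((m : Int) + 1) = dest
        · have hRd : decide (y + ((m : Int) + 1) = dest) = false := by simp; omega
          have hLd : decide (y - ((m : Int) + 1) = dest) = true := by simp [hL]
          have hpm : pvPoss hallx y dest taken m = [] := by
            unfold pvPoss
            rw [if_neg (by rintro ⟨h1, _, _⟩; omega), if_neg (by rintro ⟨_, h2, _⟩; omega)]
          have hkL : (y - dest).toNat = m + 1 := by omega
          have hp1 : pvPoss hallx y dest taken (m + 1) =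
              (if pvClearL hallx y taken (m + 1) = true then [dest] else []) := by
            unfold pvPoss
            rw [hkL]
            by_cases hc : pvClearL hallx y taken (m + 1) = true
            · rw [if_neg (by rintro ⟨h1, _, _⟩; omega), if_pos ⟨by omega, by push_cast; omega, hc⟩,
                if_pos hc]
            · rw [if_neg (by rintro ⟨h1, _, _⟩; omega), if_neg (by rintro ⟨_, _, h3⟩; exact hc h3),
                if_neg hc]
          rw [hRd, hLd, hp1, hpm]
          simp only [Bool.and_false, Bool.and_true, Bool.false_eq_true, if_false]
          by_cases hc : pvClearL hallx y taken (m + 1) = true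
          · rw [if_pos hc, if_pos hc]; simp [hL]
          · rw [if_neg hc, if_neg hc]
        · have hRd : decide (y + ((m : Int) + 1) = dest) = false := by simp [hR]
          have hLd : decide (y - ((m : Int) + 1) = dest) = false := by simp [hL]
          have hp1 : pvPoss hallx y dest taken (m + 1) = pvPoss hallx y dest taken m := by
            unfold pvPoss
            have e1 : (0 < dest - y ∧ dest - y ≤ ((m + 1 : Nat) : Int) ∧
                pvClearR hallx y taken (dest - y).toNat = true) ↔
                (0 < dest - y ∧ dest - y ≤ (m : Int) ∧
                pvClearR hallx y taken (dest - y).toNat = true) := by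
              constructor <;> rintro ⟨a, b, c⟩ <;> exact ⟨a, by push_cast at b ⊢; omega, c⟩
            have e2 : (dest - y < 0 ∧ y - dest ≤ ((m + 1 : Nat) : Int) ∧
                pvClearL hallx y taken (y - dest).toNat = true) ↔
                (dest - y < 0 ∧ y - dest ≤ (m : Int) ∧
                pvClearL hallx y taken (y - dest).toNat = true) := by
              constructor <;> rintro ⟨a, b, c⟩ <;> exact ⟨a, by push_cast at b ⊢; omega, c⟩
            simp only [e1, e2]
          rw [hRd, hLd, hp1]
          simp only [Bool.and_false, Bool.false_eq_true, if_false]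

-- B's right-going path scan equals the negation of pvClearR
theorem pvAnyR (hallx y : Int) (taken : List (Int × Int)) (j : Nat) :
    (PySem.List.pyRange (y + 1) (y + (j : Int) + 1) 1).any (fun c => taken.contains (hallx, c))
      = !pvClearR hallx y taken j := by
  induction j with
  | zero =>
      rw [show y + ((0 : Nat) : Int) + 1 = y + 1 by push_cast; ring,
        PySem.List.pyRange_one_eq_nil (by omega)]
      simp [pvClearR]
  | succ j ih =>
      rw [show y + ((j + 1 : Nat) : Int) + 1 = (y + (j : Int) + 1) + 1 by push_cast; ring,
        PySem.List.pyRange_one_succ_right (by omega), List.any_append, ih]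
      have e : y + ((j : Int) + 1) = y + (j : Int) + 1 := by ring
      simp only [pvClearR, e, List.any_cons, List.any_nil, Bool.or_false]
      cases pvClearR hallx y taken j <;> cases hc : taken.contains (hallx, y + (j : Int) + 1) <;>
        simp [hc]

theorem pvAnyL_aux (hallx y : Int) (taken : List (Int × Int)) (j : Nat) :
    (PySem.List.pyRange (y - (j : Int)) y 1).any (fun c => taken.contains (hallx, c))
      = !pvClearL hallx y taken j := by
  induction j with
  | zero =>
      rw [show y - ((0 : Nat) : Int) = y by push_cast; ring, PySem.List.pyRange_one_eq_nil (by omega)]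
      simp [pvClearL]
  | succ j ih =>
      rw [show y - ((j + 1 : Nat) : Int) = y - (j : Int) - 1 by push_cast; ring,
        PySem.List.pyRange_one_cons (by omega),
        show y - (j : Int) - 1 + 1 = y - (j : Int) by ring, List.any_cons, ih]
      have e : y - ((j : Int) + 1) = y - (j : Int) - 1 := by ring
      simp only [pvClearL, e]
      cases pvClearL hallx y taken j <;> cases hc : taken.contains (hallx, y - (j : Int) - 1) <;>
        simp [hc]

-- B's left-going path scan (a range with step -1) equals the negation of pvClearL
theorem pvAnyL (hallx y : Int) (taken : List (Int × Int)) (j : Nat) :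
    (PySem.List.pyRange (y + -1) (y - (j : Int) + -1) (-1)).any (fun c => taken.contains (hallx, c))
      = !pvClearL hallx y taken j := by
  rw [PySem.List.pyRange_neg_one_eq_reverse,
    show y - (j : Int) + -1 + 1 = y - (j : Int) by ring, show y + -1 + 1 = y by ring,
    List.any_reverse, pvAnyL_aux]

theorem possNextRoom_spec : Claim_equal_possNextRoom := by
  intro board hallx y taken typeFrog _ hpre
  unfold Spec_possNextRoom
  simp only [possNextRoom, possNextRoom_alt]
  by_cases hn : ((((PySem.List.pyGet? board hallx).getD []).length : Int)) < 2
  · rw [if_pos hn, PySem.List.pyRange_one_eq_nil (by omega)]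
    simp
  · rw [if_neg hn]
    have hlen : 2 ≤ (((PySem.List.pyGet? board hallx).getD []).length : Int) := by omega
    have hc : (((((PySem.List.pyGet? board hallx).getD []).length - 1 : Nat)) : Int) + 1
        = (((PySem.List.pyGet? board hallx).getD []).length : Int) := by
      omega
    have hmain := loopA_inv hallx y (pvGetDest typeFrog) taken
      ((((PySem.List.pyGet? board hallx).getD []).length) - 1)
    rw [hc] at hmain
    simp only [hmain]
    by_cases h0 : pvGetDest typeFrog = y
    · have hp : pvPoss hallx y (pvGetDest typeFrog) taken
          ((((PySem.List.pyGet? board hallx).getD []).length) - 1) = [] := by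
        unfold pvPoss
        rw [if_neg (by rintro ⟨h1, _, _⟩; omega), if_neg (by rintro ⟨h1, _, _⟩; omega)]
      rw [hp, if_pos (Or.inl h0)]
      simp
    · by_cases habs : (((PySem.List.pyGet? board hallx).getD []).length : Int) - 1
          < |pvGetDest typeFrog - y|
      · have hp : pvPoss hallx y (pvGetDest typeFrog) taken
            ((((PySem.List.pyGet? board hallx).getD []).length) - 1) = [] := by
          unfold pvPoss
          rw [if_neg (by
                rintro ⟨h1, h2, _⟩
                rcases abs_cases (pvGetDest typeFrog - y) with ⟨e, _⟩ | ⟨e, _⟩ <;>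
                  rw [e] at habs <;> omega),
            if_neg (by
                rintro ⟨h1, h2, _⟩
                rcases abs_cases (pvGetDest typeFrog - y) with ⟨e, _⟩ | ⟨e, _⟩ <;>
                  rw [e] at habs <;> omega)]
        rw [hp, if_pos (Or.inr habs)]
        simp
      · rw [if_neg (not_or.mpr ⟨h0, habs⟩)]
        have hble : |pvGetDest typeFrog - y|
            ≤ (((PySem.List.pyGet? board hallx).getD []).length : Int) - 1 := by omega
        by_cases hpos : y < pvGetDest typeFrog
        · rw [if_pos hpos,
            show pvGetDest typeFrog + 1 = y + ((pvGetDest typeFrog - y).toNat : Int) + 1 from by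
              omega,
            pvAnyR]
          have hp : pvPoss hallx y (pvGetDest typeFrog) taken
              ((((PySem.List.pyGet? board hallx).getD []).length) - 1)
              = (if pvClearR hallx y taken (pvGetDest typeFrog - y).toNat = true
                  then [pvGetDest typeFrog] else []) := by
            unfold pvPoss
            by_cases hcr : pvClearR hallx y taken (pvGetDest typeFrog - y).toNat = true
            · rw [if_pos ⟨by omega,
                by rcases abs_cases (pvGetDest typeFrog - y) with ⟨e, _⟩ | ⟨e, _⟩ <;>
                     rw [e] at hble <;> omega, hcr⟩, if_pos hcr]
            · rw [if_neg (by rintro ⟨_, _, h3⟩; exact hcr h3),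
                if_neg (by rintro ⟨h1, _, _⟩; omega), if_neg hcr]
          rw [hp]
          by_cases hcr : pvClearR hallx y taken (pvGetDest typeFrog - y).toNat = true
          · rw [if_pos hcr, hcr]
            simp only [Bool.not_true, Bool.false_eq_true, if_false, List.foldl]
            cases h1 : taken.contains (hallx + 1, pvGetDest typeFrog) <;>
              cases h2 : taken.contains (hallx + 2, pvGetDest typeFrog) <;> simp
          · have hb : pvClearR hallx y taken (pvGetDest typeFrog - y).toNat = false := by
              cases h : pvClearR hallx y taken (pvGetDest typeFrog - y).toNat
              · rfl
              · exact absurd h hcr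
            rw [if_neg hcr, hb]
            simp
        · have hneg : pvGetDest typeFrog < y := by
            rcases lt_or_ge (pvGetDest typeFrog) y with h | h
            · exact h
            · omega
          rw [if_neg hpos,
            show pvGetDest typeFrog + -1 = y - ((y - pvGetDest typeFrog).toNat : Int) + -1 from by
              omega,
            pvAnyL]
          have hp : pvPoss hallx y (pvGetDest typeFrog) taken
              ((((PySem.List.pyGet? board hallx).getD []).length) - 1)
              = (if pvClearL hallx y taken (y - pvGetDest typeFrog).toNat = true
                  then [pvGetDest typeFrog] else []) := by
            unfold pvPoss
            by_cases hcl : pvClearL hallx y taken (y - pvGetDest typeFrog).toNat = true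
            · rw [if_neg (by rintro ⟨h1, _, _⟩; omega),
                if_pos ⟨by omega,
                  by rcases abs_cases (pvGetDest typeFrog - y) with ⟨e, _⟩ | ⟨e, _⟩ <;>
                       rw [e] at hble <;> omega, hcl⟩, if_pos hcl]
            · rw [if_neg (by rintro ⟨h1, _, _⟩; omega),
                if_neg (by rintro ⟨_, _, h3⟩; exact hcl h3), if_neg hcl]
          rw [hp]
          by_cases hcl : pvClearL hallx y taken (y - pvGetDest typeFrog).toNat = true
          · rw [if_pos hcl, hcl]
            simp only [Bool.not_true, Bool.false_eq_true, if_false, List.foldl]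
            cases h1 : taken.contains (hallx + 1, pvGetDest typeFrog) <;>
              cases h2 : taken.contains (hallx + 2, pvGetDest typeFrog) <;> simp
          · have hb : pvClearL hallx y taken (y - pvGetDest typeFrog).toNat = false := by
              cases h : pvClearL hallx y taken (y - pvGetDest typeFrog).toNat
              · rfl
              · exact absurd h hcl
            rw [if_neg hcl, hb]
            simp
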